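-- pv_equiv track=rewrite | github.com/Kohdz/Algorithms | LeetCode/medium/34_rangeSumofSortedSubarray.py | rangeSumTwoPointer
-- ===== SOURCE A (Python) =====
-- def rangeSumTwoPointer(nums, n, left, right):
--     i, j, amount = 0,0,0
--     total_sum = []
--
--     while i < len(nums):
--
--         if j == len(nums) - 1:
--             amount += nums[j]
--             total_sum.append(amount)
--             i += 1
--             j = i
--             amount = 0
--         else:
--
--             if i == j:
--                 amount = nums[j]
--                 total_sum.append(amount)
--                 j += 1
--
--             else:
--                 amount += nums[j]
--                 total_sum.append(amount)
--                 j += 1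
--
--     total_sum.sort()
--     return sum(total_sum[left-1:right])%(10**9 + 7)
-- ===== SOURCE B (Python) =====
-- def rangeSumTwoPointer(nums, n, left, right):
--     prefix = [0]
--     acc = 0
--     for x in nums:
--         acc += x
--         prefix.append(acc)
--     m = len(nums)
--     sums = sorted(prefix[j] - prefix[i] for i in range(m) for j in range(i + 1, m + 1))
--     return sum(sums[left - 1:right]) % (10 ** 9 + 7)
-- ===== Notes on version B (the rewrite author's own statement) =====
-- stated objective: simpler
-- what changed: Replaced A's three-branch while-loop state machine over (i, j, amount) with a prefix-sum array and a double comprehension that reads each subarray sum as prefix[j]-prefix[i]; sort and slice-sum stay.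
import Mathlib
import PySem

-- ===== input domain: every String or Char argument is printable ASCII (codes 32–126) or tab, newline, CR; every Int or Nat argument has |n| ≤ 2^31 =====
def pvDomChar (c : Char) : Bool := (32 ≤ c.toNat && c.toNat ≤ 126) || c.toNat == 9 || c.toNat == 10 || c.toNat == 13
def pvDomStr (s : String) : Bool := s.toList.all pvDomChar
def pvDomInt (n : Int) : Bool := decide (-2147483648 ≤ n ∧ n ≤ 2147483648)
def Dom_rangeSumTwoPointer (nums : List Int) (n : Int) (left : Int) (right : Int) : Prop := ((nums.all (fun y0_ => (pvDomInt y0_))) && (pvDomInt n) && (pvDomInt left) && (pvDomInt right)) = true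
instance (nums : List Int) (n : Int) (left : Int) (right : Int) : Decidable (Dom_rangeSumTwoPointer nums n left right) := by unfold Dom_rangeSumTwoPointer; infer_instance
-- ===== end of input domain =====

-- B replaces A's three-branch while-loop state machine with prefix sums and a
-- double comprehension (objective: simpler; same asymptotic cost, sorting dominates).

-- ===== PORT A =====
-- A's while loop: state (i, j, amount, total_sum); in the two `else` branches Python
-- reads nums[j]; pyGet? = none is exactly Python's IndexError (unreachable from (0,0),
-- where always j ≤ len-1) — the port stops there, and the `some` fact gives termination.
def aLoop (nums : List Int) (i j : Nat) (amount : Int) (acc : List Int) : List Int :=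
  if _h : i < nums.length then
    if j = nums.length - 1 then
      aLoop nums (i + 1) (i + 1) 0 (acc ++ [amount + PySem.List.pyGetD nums (j : Int) 0])
    else
      match hget : PySem.List.pyGet? nums (j : Int) with
      | none => acc   -- IndexError in Python; unreachable on A's actual runs
      | some v =>
        if i = j then
          aLoop nums i (j + 1) v (acc ++ [v])
        else
          aLoop nums i (j + 1) (amount + v) (acc ++ [amount + v])
  else acc
termination_by (nums.length - i, nums.length - j)
decreasing_by
  · exact Prod.Lex.left _ _ (by omega)
  all_goals
    have hj : j < nums.length := by
      by_contra hge
      rw [PySem.List.pyGet?_natCast] at hget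
      have := List.getElem?_eq_none (l := nums) (by omega : nums.length ≤ j)
      simp [this] at hget
    exact Prod.Lex.right _ (by omega)

def rangeSumTwoPointer (nums : List Int) (n : Int) (left : Int) (right : Int) : Int :=
  let totalSum := aLoop nums 0 0 0 []
  let sortedSum := PySem.List.sorted totalSum (fun x => x) false
  PySem.Int.mod (PySem.List.slice sortedSum (some (left - 1)) (some right)).sum (10 ^ 9 + 7)

-- ===== PORT B =====
def rangeSumTwoPointer_alt (nums : List Int) (n : Int) (left : Int) (right : Int) : Int :=
  let pre := nums.foldl (fun (st : List Int × Int) x => (st.1 ++ [st.2 + x], st.2 + x)) ([0], 0)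
  let pref := pre.1
  let m : Int := nums.length
  let sums :=
    PySem.List.sorted
      ((PySem.List.pyRange 0 m 1).flatMap (fun i =>
        (PySem.List.pyRange (i + 1) (m + 1) 1).map (fun j =>
          PySem.List.pyGetD pref j 0 - PySem.List.pyGetD pref i 0)))
      (fun x => x) false
  PySem.Int.mod (PySem.List.slice sums (some (left - 1)) (some right)).sum (10 ^ 9 + 7)

-- ===== PRECONDITION & SPEC =====
def Spec_rangeSumTwoPointer (nums : List Int) (n : Int) (left : Int) (right : Int) (out : Int) : Prop := out = rangeSumTwoPointer_alt nums n left right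
instance (nums : List Int) (n : Int) (left : Int) (right : Int) (out : Int) : Decidable (Spec_rangeSumTwoPointer nums n left right out) := by unfold Spec_rangeSumTwoPointer; infer_instance

-- ===== CLAIM (what is proved, stated in full; the proofs are below) =====
def Claim_equal_rangeSumTwoPointer : Prop := ∀ (nums : List Int) (n : Int) (left : Int) (right : Int), Dom_rangeSumTwoPointer nums n left right → Spec_rangeSumTwoPointer nums n left right (rangeSumTwoPointer nums n left right)

-- ===== LEMMAS AND PROOFS =====

-- sum of nums[a:b] expressed through take-sums
def Q (nums : List Int) (a b : Nat) : Int := (nums.take b).sum - (nums.take a).sum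

-- running sums appended by B's prefix loop
def scanAdd : List Int → Int → List Int
  | [], _ => []
  | x :: xs, a => (a + x) :: scanAdd xs (a + x)


lemma scanAdd_getD (l : List Int) (a : Int) (k : Nat) (hk : k < l.length) :
    (scanAdd l a).getD k 0 = a + (l.take (k + 1)).sum := by
  induction l generalizing a k with
  | nil => simp at hk
  | cons x xs ih =>
    cases k with
    | zero => simp [scanAdd]
    | succ k =>
      simp only [scanAdd, List.getD_cons_succ, List.take_succ_cons, List.sum_cons]
      rw [ih (a + x) k (by simpa using hk)]
      ring

lemma prefix_fold (l : List Int) : ∀ (pre : List Int) (a : Int),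
    l.foldl (fun (st : List Int × Int) x => (st.1 ++ [st.2 + x], st.2 + x)) (pre, a)
      = (pre ++ scanAdd l a, a + l.sum) := by
  induction l with
  | nil => intro pre a; simp [scanAdd]
  | cons x xs ih =>
    intro pre a
    simp only [List.foldl_cons, ih, scanAdd]
    simp
    ring

lemma prefix_getD (nums : List Int) (k : Nat) (hk : k ≤ nums.length) :
    (0 :: scanAdd nums 0).getD k 0 = (nums.take k).sum := by
  cases k with
  | zero => simp
  | succ k =>
    simp only [List.getD_cons_succ]
    rw [scanAdd_getD nums 0 k (by omega)]
    simp

lemma take_succ_sum (nums : List Int) (j : Nat) (hj : j < nums.length) :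
    (nums.take (j + 1)).sum = (nums.take j).sum + nums.getD j 0 := by
  rw [List.getD_eq_getElem _ _ hj]
  exact List.sum_take_succ nums j hj


lemma aLoop_inner (nums : List Int) : ∀ (d i j : Nat) (acc : List Int), i ≤ j → j < nums.length →
    nums.length - 1 - j = d →
    aLoop nums i j (Q nums i j) acc
      = aLoop nums (i + 1) (i + 1) 0
          (acc ++ (List.range (nums.length - j)).map (fun t => Q nums i (j + 1 + t))) := by
  intro d
  induction d with
  | zero =>
    intro i j acc hij hj hd
    have hjl : j = nums.length - 1 := by omega
    have hi : i < nums.length := by omega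
    have hlen : nums.length - j = 1 := by omega
    have hQ : Q nums i j + nums[j]?.getD 0 = Q nums i (j + 1) := by
      simp only [Q]
      rw [take_succ_sum nums j hj, List.getD]
      ring
    rw [aLoop, dif_pos hi, if_pos hjl, hlen, List.range_one]
    have hgd : PySem.List.pyGetD nums (j : Int) 0 = nums[j]?.getD 0 := PySem.List.pyGetD_natCast nums j 0
    simp [hgd, hQ]
  | succ d ih =>
    intro i j acc hij hj hd
    have hne : j ≠ nums.length - 1 := by omega
    have hj1 : j + 1 < nums.length := by omega
    have hi : i < nums.length := by omega
    have hsome : PySem.List.pyGet? nums (j : Int) = some (nums.getD j 0) := by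
      rw [PySem.List.pyGet?_natCast, List.getD_eq_getElem _ _ hj]
      exact List.getElem?_eq_getElem hj
    have hQ : Q nums i j + nums.getD j 0 = Q nums i (j + 1) := by
      simp only [Q]; rw [take_succ_sum nums j hj]; ring
    have hrange : (List.range (nums.length - j)).map (fun t => Q nums i (j + 1 + t))
        = Q nums i (j + 1) :: (List.range (nums.length - (j + 1))).map (fun t => Q nums i (j + 1 + 1 + t)) := by
      have h1 : nums.length - j = (nums.length - (j + 1)) + 1 := by omega
      rw [h1, List.range_succ_eq_map, List.map_cons, List.map_map]
      refine congrArg _ (List.map_congr_left fun t _ => ?_)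
      simp only [Function.comp]
      congr 1
      omega
    rw [aLoop, dif_pos hi, if_neg hne]
    split
    · next heq => rw [hsome] at heq; cases heq
    · next v heq =>
      rw [hsome] at heq
      obtain rfl : nums.getD j 0 = v := by injection heq
      by_cases hij' : i = j
      · simp only [if_pos hij']
        have hv : nums.getD j 0 = Q nums i (j + 1) := by
          rw [← hQ]
          have : Q nums i j = 0 := by subst hij'; simp [Q]
          omega
        rw [hv, ih i (j + 1) (acc ++ [Q nums i (j + 1)]) (by omega) hj1 (by omega), hrange]
        simp
      · simp only [if_neg hij']
        rw [hQ, ih i (j + 1) (acc ++ [Q nums i (j + 1)]) (by omega) hj1 (by omega), hrange]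
        simp

def rowsFrom (nums : List Int) (d i : Nat) : List Int :=
  ((List.range d).map (fun o => i + o)).flatMap
    (fun i' => (List.range (nums.length - i')).map (fun t => Q nums i' (i' + 1 + t)))

lemma aLoop_outer (nums : List Int) : ∀ (d i : Nat) (acc : List Int), nums.length - i = d →
    aLoop nums i i 0 acc = acc ++ rowsFrom nums d i := by
  intro d
  induction d with
  | zero =>
    intro i acc hd
    rw [aLoop, dif_neg (show ¬ i < nums.length by omega)]
    simp [rowsFrom]
  | succ d ih =>
    intro i acc hd
    have hi : i < nums.length := by omega
    have h0 : (0 : Int) = Q nums i i := by simp [Q]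
    rw [h0, aLoop_inner nums (nums.length - 1 - i) i i acc (le_refl i) hi rfl,
        ih (i + 1) _ (by omega), List.append_assoc]
    refine congrArg _ ?_
    have hm : (List.range (d + 1)).map (fun o => i + o)
        = i :: (List.range d).map (fun o => i + 1 + o) := by
      rw [List.range_succ_eq_map, List.map_cons, List.map_map]
      refine congrArg _ (List.map_congr_left fun o _ => ?_)
      simp only [Function.comp]
      omega
    simp only [rowsFrom, hm, List.flatMap_cons]

lemma listA_eq (nums : List Int) :
    aLoop nums 0 0 0 [] = rowsFrom nums nums.length 0 := by
  rw [aLoop_outer nums nums.length 0 [] (by omega)]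
  simp

lemma listB_eq (nums : List Int) :
    (PySem.List.pyRange 0 (nums.length : Int) 1).flatMap (fun i =>
        (PySem.List.pyRange (i + 1) ((nums.length : Int) + 1) 1).map (fun j =>
          PySem.List.pyGetD (0 :: scanAdd nums 0) j 0 - PySem.List.pyGetD (0 :: scanAdd nums 0) i 0))
      = rowsFrom nums nums.length 0 := by
  have hcanon : rowsFrom nums nums.length 0
      = (List.range nums.length).flatMap (fun k =>
          (List.range (nums.length - k)).map (fun t => Q nums k (k + 1 + t))) := by
    simp [rowsFrom]
  rw [hcanon, PySem.List.pyRange_one]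
  have hlen : ((nums.length : Int) - 0).toNat = nums.length := by simp
  rw [hlen, List.flatMap_map]
  refine List.flatMap_congr fun k hk => ?_
  have hk' : k < nums.length := List.mem_range.mp hk
  rw [PySem.List.pyRange_one]
  have h2 : (((nums.length : Int) + 1) - ((0 : Int) + (k : Int) + 1)).toNat = nums.length - k := by
    omega
  rw [h2, List.map_map]
  refine List.map_congr_left fun t ht => ?_
  have ht' : t < nums.length - k := List.mem_range.mp ht
  have e2 : ((0 : Int) + (k : Int)) = ((k : Nat) : Int) := by ring
  simp only [Function.comp, e2, PySem.List.pyGetD_natCast]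
  rw [show ((k : Int) + 1 + (t : Int)) = ((k + 1 + t : Nat) : Int) by push_cast; ring,
     PySem.List.pyGetD_natCast, prefix_getD nums (k + 1 + t) (by omega),
     prefix_getD nums k (by omega)]
  simp [Q]

-- ===== VERDICT (by name: the statement is the Claim_ definition above) =====
theorem rangeSumTwoPointer_spec : Claim_equal_rangeSumTwoPointer := by
  intro nums n left right _hdom
  show rangeSumTwoPointer nums n left right = rangeSumTwoPointer_alt nums n left right
  unfold rangeSumTwoPointer rangeSumTwoPointer_alt
  simp only [prefix_fold nums [0] 0, List.singleton_append]
  rw [listA_eq, listB_eq]
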